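-- pv_equiv track=rewrite | github.com/ItIsNix/FileVideoEncoding | color66.py | int_to_rgb66
-- ===== SOURCE A (Python) =====
-- def int_to_rgb66(number: int) -> tuple[int, int, int]:
--     """
--     Maps an Integer to a 66 color tuple
--     :param number: a positive integer
--     :return: a tuple of 3 values (22,22,22)
--     """
--     if not isinstance(number, int):
--         raise TypeError(f'Argument must be an integer; {type(number)} is invalid.')
--     if number < 0:
--         raise ValueError(f'Argument must be a positive integer; {number} is negative.')
--
--     result: array = [0, 0, 0]
--     for i in range(3):
--         if number > 22:
--             result[i] = 22
--             number -= 22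
--         else:
--             result[i] = number
--             number = 0
--
--     return tuple(result)
-- ===== SOURCE B (Python) =====
-- def int_to_rgb66(number: int) -> tuple[int, int, int]:
--     """
--     Maps an Integer to a 66 color tuple
--     :param number: a positive integer
--     :return: a tuple of 3 values (22,22,22)
--     """
--     if not isinstance(number, int):
--         raise TypeError(f'Argument must be an integer; {type(number)} is invalid.')
--     if number < 0:
--         raise ValueError(f'Argument must be a positive integer; {number} is negative.')
--     return (min(number, 22),
--             min(max(number - 22, 0), 22),
--             min(max(number - 44, 0), 22))
-- ===== Notes on version B (the rewrite author's own statement) =====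
-- stated objective: simpler
-- what changed: Replaces the three-iteration loop with a mutating counter and result array by three independent closed-form clamps of the input (min/max arithmetic), no loop or accumulator.
import Mathlib
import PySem

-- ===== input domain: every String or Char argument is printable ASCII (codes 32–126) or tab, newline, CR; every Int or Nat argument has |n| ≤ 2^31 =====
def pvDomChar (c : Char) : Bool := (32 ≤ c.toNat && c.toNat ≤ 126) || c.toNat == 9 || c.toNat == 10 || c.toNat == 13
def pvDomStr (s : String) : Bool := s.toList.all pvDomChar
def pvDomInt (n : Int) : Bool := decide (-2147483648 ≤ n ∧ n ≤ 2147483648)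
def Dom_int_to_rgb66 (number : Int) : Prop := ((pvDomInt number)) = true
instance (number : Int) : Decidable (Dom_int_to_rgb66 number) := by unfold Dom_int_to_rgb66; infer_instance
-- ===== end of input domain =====

-- B replaces A's 3-iteration loop with three independent closed-form min/max clamps of the input (objective: simpler).


-- ===== PORT A =====
-- A's loop `for i in range(3)` mutating the list `result` and the counter `number`,
-- ported as a fold over List.range 3 carrying the (result, number) state.
def int_to_rgb66 (number : Int) : Int × Int × Int :=
  let st := (List.range 3).foldl
    (fun (st : List Int × Int) (i : Nat) =>
      if st.2 > 22 then (st.1.set i 22, st.2 - 22)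
      else (st.1.set i st.2, (0 : Int)))
    ([0, 0, 0], number)
  match st.1 with
  | [a, b, c] => (a, b, c)
  | _ => (0, 0, 0)

-- ===== PORT B =====
def int_to_rgb66_alt (number : Int) : Int × Int × Int :=
  (min number 22, min (max (number - 22) 0) 22, min (max (number - 44) 0) 22)

-- ===== PRECONDITION & SPEC =====
-- A raises ValueError on negative input (and B raises likewise); Pre_ excludes exactly those inputs.
def Pre_int_to_rgb66 (number : Int) : Prop := 0 ≤ number
instance (number : Int) : Decidable (Pre_int_to_rgb66 number) := by unfold Pre_int_to_rgb66; infer_instance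
def pvWitness_int_to_rgb66 : Int := 23

def Spec_int_to_rgb66 (number : Int) (out : Int × Int × Int) : Prop := out = int_to_rgb66_alt number
instance (number : Int) (out : Int × Int × Int) : Decidable (Spec_int_to_rgb66 number out) := by unfold Spec_int_to_rgb66; infer_instance

-- ===== CLAIM (what is proved, stated in full; the proofs are below) =====
def Claim_equal_int_to_rgb66 : Prop := ∀ (number : Int), Dom_int_to_rgb66 number → Pre_int_to_rgb66 number → Spec_int_to_rgb66 number (int_to_rgb66 number)

-- ===== LEMMAS AND PROOFS =====

-- ===== VERDICT (by name: the statement is the Claim_ definition above) =====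
theorem int_to_rgb66_spec : Claim_equal_int_to_rgb66 := by
  intro number _ hpre
  unfold Spec_int_to_rgb66 int_to_rgb66 int_to_rgb66_alt
  unfold Pre_int_to_rgb66 at hpre
  simp only [List.range, List.range.loop, List.foldl, List.set]
  split_ifs <;> simp_all <;> omega
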